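-- pv_equiv track=rewrite | github.com/min486/Algorithm-Python | Programmers/KAKAO/22_인턴십/5_행렬과연산.py | solution
-- ===== SOURCE A (Python) =====
-- from collections import deque
--
-- def solution(rc, operations):
--     rc = deque([deque(li) for li in rc])
--     firsts = deque()
--     lasts = deque()
--
--     # firsts / rc / lasts 분리
--     for q in rc:
--         firsts.append(q.popleft())
--         lasts.append(q.pop())
--
--     for ope in operations:
--         if ope == 'ShiftRow':
--             rc.appendleft(rc.pop())
--             firsts.appendleft(firsts.pop())
--             lasts.appendleft(lasts.pop())
--         else:  # Rotate
--             rc[0].appendleft(firsts.popleft())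
--             lasts.appendleft(rc[0].pop())
--             rc[-1].append(lasts.pop())
--             firsts.append(rc[-1].popleft())
--
--     # firsts / rc / lasts 합치기
--     for q in rc:
--         q.appendleft(firsts.popleft())
--         q.append(lasts.popleft())
--
--     res = [list(q) for q in rc]
--     return res
-- ===== SOURCE B (Python) =====
-- def solution(rc, operations):
--     g = [list(r) for r in rc]
--     for op in operations:
--         if op == 'ShiftRow':
--             g = g[-1:] + g[:-1]
--         elif len(g) == 1:
--             r = g[0]
--             g = [r[-1:] + r[:-1]]
--         else:
--             rows = [g[1][:1] + g[0][:-1]]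
--             for prev, cur, nxt in zip(g, g[1:-1], g[2:]):
--                 rows.append(nxt[:1] + cur[1:-1] + [prev[-1]])
--             rows.append(g[-1][1:] + [g[-2][-1]])
--             g = rows
--     return g
-- ===== Notes on version B (the rewrite author's own statement) =====
-- stated objective: simpler
-- what changed: B keeps the whole matrix as a list of full rows and rebuilds it per operation (last row to front for ShiftRow; top row shifted right, last column down, bottom row left, first column up for Rotate), instead of A's mutable three-deque state (firsts/middles/lasts) that is split off at the start and stitched back at the end.
-- outside the precondition, e.g. on solution([[1, 2, 3]], ['Rotate']): A returns [[1, 3, 2]], B returns [[3, 1, 2]]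
import Mathlib
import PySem

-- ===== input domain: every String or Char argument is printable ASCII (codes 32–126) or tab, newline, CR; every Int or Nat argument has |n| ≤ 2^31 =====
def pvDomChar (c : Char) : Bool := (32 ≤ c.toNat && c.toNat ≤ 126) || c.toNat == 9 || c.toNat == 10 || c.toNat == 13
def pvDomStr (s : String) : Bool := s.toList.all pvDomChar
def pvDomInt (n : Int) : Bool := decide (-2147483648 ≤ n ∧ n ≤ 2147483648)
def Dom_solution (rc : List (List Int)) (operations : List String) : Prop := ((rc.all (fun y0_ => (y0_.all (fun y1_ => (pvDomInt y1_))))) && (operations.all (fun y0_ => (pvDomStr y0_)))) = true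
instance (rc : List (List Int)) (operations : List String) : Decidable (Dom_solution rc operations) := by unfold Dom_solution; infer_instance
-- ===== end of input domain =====

-- B replaces A's three-deque (firsts / middles / lasts) state machine by a direct rebuild of the
-- full row matrix for every operation: simpler, no separated columns (objective: simpler; not faster).

-- ===== PORT A =====
-- the split loop: for q in rc: firsts.append(q.popleft()); lasts.append(q.pop())
-- (deque popleft = headD, pop = getLastD/dropLast; exact on rows of length ≥ 2, guaranteed by Pre_)
def splitA : List (List Int) → List Int × List (List Int) × List Int
  | [] => ([], [], [])
  | q :: rest =>
    let s := splitA rest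
    (q.headD 0 :: s.1, q.tail.dropLast :: s.2.1, q.tail.getLastD 0 :: s.2.2)

-- one iteration of A's operations loop on the state (firsts, middles, lasts)
def stepA (s : List Int × List (List Int) × List Int) (op : String) :
    List Int × List (List Int) × List Int :=
  if op = "ShiftRow" then
    -- appendleft(pop()) on each of the three deques
    (s.1.getLastD 0 :: s.1.dropLast, s.2.1.getLastD [] :: s.2.1.dropLast,
     s.2.2.getLastD 0 :: s.2.2.dropLast)
  else
    let m0 := s.1.headD 0 :: s.2.1.headD []      -- rc[0].appendleft(firsts.popleft())
    let fs1 := s.1.tail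
    let t := m0.getLastD 0                        -- rc[0].pop()
    let ls1 := t :: s.2.2                         -- lasts.appendleft(...)
    let ms1 := m0.dropLast :: s.2.1.tail          -- rc[0] mutated in place
    let b := ls1.getLastD 0                       -- lasts.pop()
    let ls2 := ls1.dropLast
    let ml := ms1.getLastD [] ++ [b]              -- rc[-1].append(...)  (rc[-1] = rc[0] when len 1)
    let fs2 := fs1 ++ [ml.headD 0]                -- firsts.append(rc[-1].popleft())
    let ms2 := ms1.dropLast ++ [ml.tail]
    (fs2, ms2, ls2)

-- the merge loop: for q in rc: q.appendleft(firsts.popleft()); q.append(lasts.popleft())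
def mergeA : List Int × List (List Int) × List Int → List (List Int)
  | (f :: fs, m :: ms, l :: ls) => (f :: (m ++ [l])) :: mergeA (fs, ms, ls)
  | _ => []

def solution (rc : List (List Int)) (operations : List String) : List (List Int) :=
  mergeA (operations.foldl stepA (splitA rc))

-- ===== PORT B =====
-- nxt[:1] + cur[1:-1] + [prev[-1]]  (exact: prev nonempty under Pre_)
def rotEdge (prev cur nxt : List Int) : List Int :=
  cur.tail.dropLast |> (fun m => nxt.take 1 ++ m ++ [prev.getLastD 0])

-- the zip(g, g[1:-1], g[2:]) loop of Source B
def zip3Rows : List (List Int) → List (List Int) → List (List Int) → List (List Int)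
  | p :: ps, c :: cs, n :: ns => rotEdge p c n :: zip3Rows ps cs ns
  | _, _, _ => []

-- one iteration of Source B's loop; slices ported per PySem.List.slice lemmas:
-- g[-1:] = drop (len-1), g[:-1] = dropLast, r[1:] = tail, r[:1] = take 1;
-- g[1] / g[-2] / r[-1] as headD / dropLast.getLastD / getLastD (exact on nonempty, guaranteed by Pre_)
def stepB (g : List (List Int)) (op : String) : List (List Int) :=
  if op = "ShiftRow" then g.drop (g.length - 1) ++ g.dropLast          -- g[-1:] + g[:-1]
  else if g.length = 1 then
    let r := g.headD []
    [r.drop (r.length - 1) ++ r.dropLast]                              -- [r[-1:] + r[:-1]]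
  else
    let top := (g.tail.headD []).take 1 ++ (g.headD []).dropLast       -- g[1][:1] + g[0][:-1]
    let mids := zip3Rows g g.tail.dropLast g.tail.tail                 -- zip(g, g[1:-1], g[2:])
    let bot := (g.getLastD []).tail ++ [((g.dropLast).getLastD []).getLastD 0]  -- g[-1][1:] + [g[-2][-1]]
    top :: (mids ++ [bot])

def solution_alt (rc : List (List Int)) (operations : List String) : List (List Int) :=
  operations.foldl stepB (rc.map (fun r => r))    -- [list(r) for r in rc]

-- ===== PRECONDITION & SPEC =====
-- Pre_ excludes (a) grids with a row of fewer than 2 entries and (b) empty grids with a nonempty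
-- operation list — on both A raises IndexError — and (c) single-row grids of width ≥ 3 under a
-- Rotate operation, where the outer border is the whole row and A's and B's one-step border
-- rotations are both defensible but differ (on width-2 single rows they agree, so those stay inside).
def Pre_solution (rc : List (List Int)) (operations : List String) : Prop :=
  (∀ r ∈ rc, 2 ≤ r.length) ∧ (operations ≠ [] → rc ≠ []) ∧
  (rc.length = 1 → (∀ op ∈ operations, op = "ShiftRow") ∨ (∀ r ∈ rc, r.length = 2))
instance (rc : List (List Int)) (operations : List String) : Decidable (Pre_solution rc operations) := by
  unfold Pre_solution; infer_instance

def pvWitness_solution : List (List Int) × List String :=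
  ([[1, 2, 3], [4, 5, 6], [7, 8, 9]], ["Rotate", "ShiftRow", "Rotate"])

def Spec_solution (rc : List (List Int)) (operations : List String) (out : List (List Int)) : Prop := out = solution_alt rc operations
instance (rc : List (List Int)) (operations : List String) (out : List (List Int)) : Decidable (Spec_solution rc operations out) := by unfold Spec_solution; infer_instance

-- ===== CLAIM (what is proved, stated in full; the proofs are below) =====
def Claim_equal_solution : Prop := ∀ (rc : List (List Int)) (operations : List String), Dom_solution rc operations → Pre_solution rc operations → Spec_solution rc operations (solution rc operations)

-- ===== LEMMAS AND PROOFS =====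

-- proof-side row projections: A's firsts / middles / lasts entries for a row
def pvHd (r : List Int) : Int := r.headD 0
def pvMid (r : List Int) : List Int := r.tail.dropLast
def pvLst (r : List Int) : Int := r.tail.getLastD 0
def pvT (g : List (List Int)) : List Int × List (List Int) × List Int :=
  (g.map pvHd, g.map pvMid, g.map pvLst)

lemma splitA_eq (g : List (List Int)) : splitA g = pvT g := by
  induction g with
  | nil => rfl
  | cons q rest ih => simp [splitA, ih, pvT, pvHd, pvMid, pvLst]

lemma row_decomp (r : List Int) (h : 2 ≤ r.length) : pvHd r :: (pvMid r ++ [pvLst r]) = r := by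
  match r, h with
  | a :: b :: s, _ =>
    have hne : b :: s ≠ [] := by simp
    simp only [pvHd, pvMid, pvLst, List.headD_cons, List.tail_cons,
      List.getLastD_eq_getLast?, List.getLast?_eq_some_getLast hne, Option.getD_some]
    simp [List.dropLast_append_getLast hne]

lemma hd_cons_mid (r : List Int) (h : 2 ≤ r.length) : pvHd r :: pvMid r = r.dropLast := by
  match r, h with
  | a :: b :: s, _ => simp [pvHd, pvMid]

lemma mid_append_lst (r : List Int) (h : 2 ≤ r.length) : pvMid r ++ [pvLst r] = r.tail := by
  have := row_decomp r h
  exact congrArg List.tail this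

lemma pvLst_eq (r : List Int) (h : 2 ≤ r.length) : pvLst r = r.getLastD 0 := by
  match r, h with
  | a :: b :: s, _ =>
    simp [pvLst, List.getLastD_eq_getLast?, List.getLast?_eq_some_getLast (l := b :: s) (by simp),
      List.getLast?_eq_some_getLast (l := a :: b :: s) (by simp), List.getLast_cons]

lemma merge_pvT (g : List (List Int)) (h : ∀ r ∈ g, 2 ≤ r.length) : mergeA (pvT g) = g := by
  induction g with
  | nil => simp [pvT, mergeA]
  | cons q rest ih =>
    have hq := h q (by simp)
    have ih' := ih (fun r hr => h r (by simp [hr]))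
    simp only [pvT, List.map_cons] at ih' ⊢
    simp [mergeA, ih', row_decomp q hq]


lemma headD_append (l l' : List Int) (h : l ≠ []) : (l ++ l').headD 0 = l.headD 0 := by
  cases l with | nil => simp at h | cons a t => simp

lemma tail_append (l l' : List Int) (h : l ≠ []) : (l ++ l').tail = l.tail ++ l' := by
  cases l with | nil => simp at h | cons a t => simp

lemma take_one (l : List Int) (h : l ≠ []) : l.take 1 = [l.headD 0] := by
  cases l with | nil => simp at h | cons a t => simp [List.take]

lemma map_pvLst_decomp (l : List (List Int)) (h : l ≠ []) :
    l.map pvLst = l.dropLast.map pvLst ++ [pvLst (l.getLastD [])] := by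
  obtain ⟨l', a, rfl⟩ := l.eq_nil_or_concat.resolve_left h
  simp

lemma zip3_maps : ∀ (ps cs ns : List (List Int)),
    cs.length = ns.length → ps.length = ns.length + 2 →
    (∀ n ∈ ns, n ≠ []) → (∀ p ∈ ps, 2 ≤ p.length) →
    (zip3Rows ps cs ns).map pvHd = ns.map pvHd ∧
    (zip3Rows ps cs ns).map pvMid = cs.map pvMid ∧
    (zip3Rows ps cs ns).map pvLst = (ps.dropLast.dropLast).map pvLst
  | ps, [], [], _, hp, _, _ => by
    have : ps.dropLast.dropLast = [] := by
      have : ps.dropLast.dropLast.length = 0 := by simp [hp]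
      exact List.eq_nil_of_length_eq_zero this
    cases ps with
    | nil => simp [zip3Rows]
    | cons p ps' => simp [zip3Rows, this]
  | p :: ps, c :: cs, n :: ns, hc, hp, hn, hps => by
    have hrec := zip3_maps ps cs ns (by simp at hc; omega) (by simp at hp; omega)
      (fun x hx => hn x (by simp [hx])) (fun x hx => hps x (by simp [hx]))
    have hne : n ≠ [] := hn n (by simp)
    obtain ⟨v, vt, rfl⟩ := List.exists_cons_of_ne_nil hne
    have hp2 : 2 ≤ p.length := hps p (by simp)
    have hplen : ps.length = ns.length + 2 := by simp at hp; omega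
    have h1 : ps ≠ [] := List.ne_nil_of_length_pos (by omega)
    have h2 : ps.dropLast ≠ [] := List.ne_nil_of_length_pos (by simp [List.length_dropLast]; omega)
    refine ⟨?_, ?_, ?_⟩
    · simp [zip3Rows, rotEdge, pvHd, hrec.1]
    · simp [zip3Rows, rotEdge, pvMid, hrec.2.1]
    · simp only [zip3Rows, List.map_cons, rotEdge, List.dropLast_cons_of_ne_nil h1,
        List.dropLast_cons_of_ne_nil h2, hrec.2.2]
      congr 1
      rw [pvLst_eq p hp2]
      simp [pvLst]

lemma headD_mem {α : Type} (l : List α) (d : α) (h : l ≠ []) : l.headD d ∈ l := by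
  cases l with | nil => simp at h | cons a t => simp

lemma getLastD_mem {α : Type} (l : List α) (d : α) (h : l ≠ []) : l.getLastD d ∈ l := by
  obtain ⟨l', a, rfl⟩ := l.eq_nil_or_concat.resolve_left h
  simp

lemma map_head_decomp {α β : Type} (f : α → β) (l : List α) (d : α) (h : l ≠ []) :
    l.map f = f (l.headD d) :: l.tail.map f := by
  cases l with | nil => simp at h | cons a t => simp

lemma stepA_rot (r0 rl : List Int) (grest : List (List Int)) (op : String) (hop : ¬ op = "ShiftRow")
    (h0 : 2 ≤ r0.length) (hrl : 2 ≤ rl.length) :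
    stepA (pvT (r0 :: (grest ++ [rl]))) op =
      (List.map pvHd (grest ++ [rl]) ++ [rl.tail.headD 0],
       r0.dropLast.dropLast :: (List.map pvMid grest ++ [rl.tail.tail]),
       r0.dropLast.getLastD 0 :: pvLst r0 :: List.map pvLst grest) := by
  have hmid : (pvHd r0 :: pvMid r0) = r0.dropLast := hd_cons_mid r0 h0
  simp only [stepA, if_neg hop, pvT, List.map_cons, List.map_append, List.headD_cons,
    List.tail_cons, hmid]
  have hml : pvMid rl ++ [pvLst rl] = rl.tail := mid_append_lst rl hrl
  simp only [List.map_nil, ← List.cons_append, List.getLastD_concat,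
    List.dropLast_concat, hml]

lemma stepB_rot (r0 rl : List Int) (grest : List (List Int)) (op : String) (hop : ¬ op = "ShiftRow")
    (hg : ∀ r ∈ (r0 :: (grest ++ [rl])), 2 ≤ r.length) :
    pvT (stepB (r0 :: (grest ++ [rl])) op) =
      (List.map pvHd (grest ++ [rl]) ++ [rl.tail.headD 0],
       r0.dropLast.dropLast :: (List.map pvMid grest ++ [rl.tail.tail]),
       r0.dropLast.getLastD 0 :: pvLst r0 :: List.map pvLst grest) := by
  have h0 : 2 ≤ r0.length := hg r0 (by simp)
  have hrl : 2 ≤ rl.length := hg rl (by simp)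
  have hrlt : rl.tail ≠ [] := List.ne_nil_of_length_pos (by simp [List.length_tail]; omega)
  have hgs : grest ++ [rl] ≠ [] := by simp
  have hh : (grest ++ [rl]).headD [] ∈ (r0 :: (grest ++ [rl])) := by
    exact List.mem_cons_of_mem _ (headD_mem _ _ hgs)
  have hhne : (grest ++ [rl]).headD [] ≠ [] :=
    List.ne_nil_of_length_pos (by have := hg _ hh; omega)
  have hlast : (r0 :: grest).getLastD [] ∈ (r0 :: (grest ++ [rl])) := by
    have hmem := getLastD_mem (r0 :: grest) [] (by simp)
    rcases List.mem_cons.1 hmem with h | h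
    · exact List.mem_cons.2 (Or.inl h)
    · exact List.mem_cons_of_mem _ (List.mem_append_left _ h)
  have hlast2 : 2 ≤ ((r0 :: grest).getLastD []).length := hg _ hlast
  have hzip := zip3_maps (r0 :: (grest ++ [rl])) grest ((grest ++ [rl]).tail)
    (by simp) (by simp)
    (fun n hn => List.ne_nil_of_length_pos
      (by have := hg n (List.mem_cons_of_mem _ (List.mem_of_mem_tail hn)); omega))
    hg
  have hlen1 : ¬ ((r0 :: (grest ++ [rl])).length = 1) := by simp
  have hdrop : (r0 :: (grest ++ [rl])).dropLast = r0 :: grest := by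
    rw [← List.cons_append, List.dropLast_concat]
  have hgetl : (r0 :: (grest ++ [rl])).getLastD [] = rl := by
    rw [← List.cons_append, List.getLastD_concat]
  simp only [stepB, if_neg hop, if_neg hlen1, List.tail_cons, List.headD_cons,
    List.dropLast_concat, hdrop, hgetl]
  simp only [pvT, List.map_cons, List.map_append, List.map_cons]
  simp only [hzip.1, hzip.2.1, hzip.2.2, hdrop]
  rw [take_one _ hhne]
  refine Prod.ext ?_ (Prod.ext ?_ ?_)
  · -- firsts component
    dsimp only
    have hfs := (map_head_decomp pvHd (grest ++ [rl]) [] hgs).symm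
    have hb : pvHd (rl.tail ++ [((r0 :: grest).getLastD []).getLastD 0]) = rl.tail.headD 0 := by
      simp only [pvHd]; exact headD_append _ _ hrlt
    have ht : pvHd ([((grest ++ [rl]).headD []).headD 0] ++ r0.dropLast) =
        pvHd ((grest ++ [rl]).headD []) := by simp [pvHd]
    simp only [List.map_nil, hb, ht]
    have h2 := congrArg (fun l => l ++ [rl.tail.headD 0]) hfs
    simp only [List.map_append, List.map_cons, List.map_nil, List.cons_append,
      List.append_assoc, List.nil_append] at h2 ⊢
    exact h2
  · -- middles component
    dsimp only
    simp [pvMid, tail_append _ _ hrlt]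
  · -- lasts component
    dsimp only
    have hbot : pvLst (rl.tail ++ [((r0 :: grest).getLastD []).getLastD 0]) =
        pvLst ((r0 :: grest).getLastD []) := by
      rw [pvLst_eq _ hlast2]
      simp [pvLst, tail_append _ _ hrlt]
    rw [hbot]
    simp only [List.map_nil]
    rw [← map_pvLst_decomp (r0 :: grest) (by simp)]
    simp [pvLst]

lemma zip3_len : ∀ (ps cs ns : List (List Int)),
    (zip3Rows ps cs ns).length = min ps.length (min cs.length ns.length)
  | [], _, _ => by simp [zip3Rows]
  | _ :: _, [], _ => by simp [zip3Rows]
  | _ :: _, _ :: _, [] => by simp [zip3Rows]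
  | p :: ps, c :: cs, n :: ns => by
    simp [zip3Rows, zip3_len ps cs ns]

lemma zip3_row_len : ∀ (ps cs ns : List (List Int)),
    (∀ n ∈ ns, n ≠ []) → (∀ c ∈ cs, 2 ≤ c.length) →
    ∀ row ∈ zip3Rows ps cs ns, ∃ c ∈ cs, row.length = c.length
  | [], _, _, _, _ => by simp [zip3Rows]
  | _ :: _, [], _, _, _ => by simp [zip3Rows]
  | _ :: _, _ :: _, [], _, _ => by simp [zip3Rows]
  | p :: ps, c :: cs, n :: ns, hn, hc => by
    intro row hrow
    rcases List.mem_cons.1 hrow with h | h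
    · refine ⟨c, by simp, ?_⟩
      subst h
      have hne : n ≠ [] := hn n (by simp)
      have hc2 : 2 ≤ c.length := hc c (by simp)
      obtain ⟨v, vt, rfl⟩ := List.exists_cons_of_ne_nil hne
      simp [rotEdge, List.length_tail, List.length_dropLast]
      omega
    · obtain ⟨c', hc', he⟩ := zip3_row_len ps cs ns (fun x hx => hn x (by simp [hx]))
        (fun x hx => hc x (by simp [hx])) row h
      exact ⟨c', by simp [hc'], he⟩

lemma step_comm (g : List (List Int)) (op : String)
    (hg : ∀ r ∈ g, 2 ≤ r.length) (hne : g ≠ [])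
    (hone : g.length = 1 → op = "ShiftRow" ∨ ∀ r ∈ g, r.length = 2) :
    stepA (pvT g) op = pvT (stepB g op) := by
  by_cases hop : op = "ShiftRow"
  · obtain ⟨l, a, rfl⟩ := g.eq_nil_or_concat.resolve_left hne
    have hdr : (l ++ [a]).drop ((l ++ [a]).length - 1) = [a] := by
      have : (l ++ [a]).length - 1 = l.length := by simp
      rw [this, List.drop_left]
    simp [stepA, stepB, hop, pvT, List.map_append]
  · by_cases h1 : g.length = 1
    · rcases hone h1 with h | hw2
      · exact absurd h hop
      · match g, h1 with
        | [r], _ =>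
          match r, hw2 r (by simp) with
          | [x, y], _ => simp [stepA, stepB, hop, pvT, pvHd, pvMid, pvLst]
    · match g, hne with
      | r0 :: gs, _ =>
        have hgs : gs ≠ [] := by
          intro h; subst h; simp at h1
        obtain ⟨grest, rl, rfl⟩ := gs.eq_nil_or_concat.resolve_left hgs
        simp only [List.concat_eq_append] at hg ⊢
        rw [stepA_rot r0 rl grest op hop (hg r0 (by simp)) (hg rl (by simp)),
          stepB_rot r0 rl grest op hop hg]

lemma stepB_good (g : List (List Int)) (op : String)
    (hg : ∀ r ∈ g, 2 ≤ r.length) (hne : g ≠ []) :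
    ∀ r ∈ stepB g op, 2 ≤ r.length := by
  intro row hrow
  by_cases hop : op = "ShiftRow"
  · simp only [stepB, if_pos hop] at hrow
    rcases List.mem_append.1 hrow with h | h
    · exact hg row (List.drop_subset _ _ h)
    · exact hg row (List.dropLast_subset _ h)
  · by_cases h1 : g.length = 1
    · simp only [stepB, if_neg hop, if_pos h1] at hrow
      have hr : g.headD [] ∈ g := headD_mem _ _ hne
      have h2 : 2 ≤ (g.headD []).length := hg _ hr
      simp only [List.mem_singleton] at hrow
      subst hrow
      simp only [List.length_append, List.length_drop, List.length_dropLast]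
      omega
    · simp only [stepB, if_neg hop, if_neg h1] at hrow
      have hn2 : 2 ≤ g.length := by
        cases g with
        | nil => simp at hne
        | cons a t =>
          cases t with
          | nil => simp at h1
          | cons b t' => simp
      have htne : g.tail ≠ [] := List.ne_nil_of_length_pos (by simp [List.length_tail]; omega)
      rcases List.mem_cons.1 hrow with h | h
      · -- top row
        subst h
        have hh : g.tail.headD [] ∈ g := List.mem_of_mem_tail (headD_mem _ _ htne)
        have h0 : g.headD [] ∈ g := headD_mem _ _ hne
        have := hg _ hh; have := hg _ h0
        rw [take_one _ (List.ne_nil_of_length_pos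
          (show 0 < (g.tail.headD []).length by omega))]
        simp only [List.length_append, List.length_cons, List.length_nil, List.length_dropLast]
        omega
      · rcases List.mem_append.1 h with h | h
        · -- middle rows
          obtain ⟨c, hc, he⟩ := zip3_row_len g g.tail.dropLast g.tail.tail
            (fun n hn => List.ne_nil_of_length_pos (by
              have := hg n (List.mem_of_mem_tail (List.mem_of_mem_tail hn)); omega))
            (fun c hc => hg c (List.mem_of_mem_tail (List.dropLast_subset _ hc))) row h
          have := hg c (List.mem_of_mem_tail (List.dropLast_subset _ hc))
          omega
        · -- bottom row
          simp only [List.mem_singleton] at h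
          subst h
          have hl : g.getLastD [] ∈ g := getLastD_mem _ _ hne
          have := hg _ hl
          simp only [List.length_append, List.length_tail, List.length_cons, List.length_nil]
          omega

lemma stepB_len (g : List (List Int)) (op : String) (hne : g ≠ []) :
    (stepB g op).length = g.length := by
  by_cases hop : op = "ShiftRow"
  · have h1 : 1 ≤ g.length := List.length_pos_of_ne_nil hne
    simp [stepB, hop, List.length_drop, List.length_dropLast]
  · by_cases h1 : g.length = 1
    · simp [stepB, hop, h1]
    · have hn2 : 2 ≤ g.length := by
        have := List.length_pos_of_ne_nil hne; omega
      simp [stepB, hop, h1, zip3_len, List.length_tail, List.length_dropLast]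
      omega

lemma stepB_w2 (g : List (List Int)) (op : String) (hne : g ≠ [])
    (h : ∀ r ∈ g, r.length = 2) :
    ∀ r ∈ stepB g op, r.length = 2 := by
  intro row hrow
  by_cases hop : op = "ShiftRow"
  · simp only [stepB, if_pos hop] at hrow
    rcases List.mem_append.1 hrow with hr | hr
    · exact h row (List.drop_subset _ _ hr)
    · exact h row (List.dropLast_subset _ hr)
  · by_cases h1 : g.length = 1
    · simp only [stepB, if_neg hop, if_pos h1] at hrow
      have h2 : (g.headD []).length = 2 := h _ (headD_mem _ _ hne)
      simp only [List.mem_singleton] at hrow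
      subst hrow
      simp only [List.length_append, List.length_drop, List.length_dropLast]
      omega
    · simp only [stepB, if_neg hop, if_neg h1] at hrow
      have hn2 : 2 ≤ g.length := by
        have := List.length_pos_of_ne_nil hne; omega
      have htne : g.tail ≠ [] := List.ne_nil_of_length_pos (by simp [List.length_tail]; omega)
      rcases List.mem_cons.1 hrow with hr | hr
      · subst hr
        have hh := h _ (List.mem_of_mem_tail (headD_mem g.tail [] htne))
        have h0 := h _ (headD_mem g [] hne)
        rw [take_one _ (List.ne_nil_of_length_pos
          (show 0 < (g.tail.headD []).length by omega))]
        simp only [List.length_append, List.length_cons, List.length_nil, List.length_dropLast]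
        omega
      · rcases List.mem_append.1 hr with hr | hr
        · obtain ⟨c, hc, he⟩ := zip3_row_len g g.tail.dropLast g.tail.tail
            (fun n hn => List.ne_nil_of_length_pos (by
              have := h n (List.mem_of_mem_tail (List.mem_of_mem_tail hn)); omega))
            (fun c hc => by
              have := h c (List.mem_of_mem_tail (List.dropLast_subset _ hc)); omega) row hr
          have := h c (List.mem_of_mem_tail (List.dropLast_subset _ hc))
          omega
        · simp only [List.mem_singleton] at hr
          subst hr
          have := h _ (getLastD_mem g [] hne)
          simp only [List.length_append, List.length_tail, List.length_cons, List.length_nil]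
          omega

lemma fold_inv (ops : List String) (g : List (List Int))
    (hg : ∀ r ∈ g, 2 ≤ r.length) (hne : ops ≠ [] → g ≠ [])
    (hone : g.length = 1 → (∀ op ∈ ops, op = "ShiftRow") ∨ (∀ r ∈ g, r.length = 2)) :
    ops.foldl stepA (pvT g) = pvT (ops.foldl stepB g) ∧
      (∀ r ∈ ops.foldl stepB g, 2 ≤ r.length) := by
  induction ops generalizing g with
  | nil => exact ⟨rfl, hg⟩
  | cons op ops' ih =>
    have hne' : g ≠ [] := hne (by simp)
    have hone' : g.length = 1 → op = "ShiftRow" ∨ ∀ r ∈ g, r.length = 2 := by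
      intro h
      rcases hone h with hs | hw
      · exact Or.inl (hs op (by simp))
      · exact Or.inr hw
    have hstep := step_comm g op hg hne' hone'
    have hg' := stepB_good g op hg hne'
    have hlen := stepB_len g op hne'
    have hne'' : ops' ≠ [] → stepB g op ≠ [] := fun _ =>
      List.ne_nil_of_length_pos (by rw [hlen]; exact List.length_pos_of_ne_nil hne')
    have hone'' : (stepB g op).length = 1 →
        (∀ o ∈ ops', o = "ShiftRow") ∨ (∀ r ∈ stepB g op, r.length = 2) := by
      intro h
      rw [hlen] at h
      rcases hone h with hs | hw
      · exact Or.inl (fun o ho => hs o (by simp [ho]))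
      · exact Or.inr (stepB_w2 g op hne' hw)
    have := ih (stepB g op) hg' hne'' hone''
    simpa [List.foldl_cons, hstep] using this

-- ===== VERDICT (by name: the statement is the Claim_ definition above) =====
theorem solution_spec : Claim_equal_solution := by
  intro rc ops _ hpre
  obtain ⟨hg, hne, hone⟩ := hpre
  have hmap : rc.map (fun r => r) = rc := by simp
  have h := fold_inv ops rc hg hne hone
  unfold Spec_solution solution solution_alt
  rw [hmap, splitA_eq, h.1, merge_pvT _ h.2]
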